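-- pv_equiv track=rewrite | github.com/fabricejeannet/kataRomanNumerals | roman_python.py | combien_de
-- ===== SOURCE A (Python) =====
-- def combien_de(ordre, piege, nombre_romain):
--     index_dans_l_ordre = 0
--     quantite = 0
--     for item in ordre:
--         position_item = nombre_romain.find(item)
--         if position_item != -1 and nombre_romain[position_item - 1:position_item + 1] != piege:
--             quantite = index_dans_l_ordre
--
--         index_dans_l_ordre += 1
--
--     return quantite
-- ===== SOURCE B (Python) =====
-- def combien_de(ordre, piege, nombre_romain):
--     # backward scan with early exit: the first qualifying index from the end
--     # is exactly A's last-overwritten accumulator value; default 0.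
--     for index, item in reversed(list(enumerate(ordre))):
--         position_item = nombre_romain.find(item)
--         if position_item != -1 and nombre_romain[position_item - 1:position_item + 1] != piege:
--             return index
--     return 0
-- ===== Notes on version B (the rewrite author's own statement) =====
-- stated objective: faster
-- what changed: Replaces the forward scan that overwrites an accumulator with a backward scan over reversed(enumerate(ordre)) that returns the first qualifying index immediately (early exit), default 0.
import Mathlib
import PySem

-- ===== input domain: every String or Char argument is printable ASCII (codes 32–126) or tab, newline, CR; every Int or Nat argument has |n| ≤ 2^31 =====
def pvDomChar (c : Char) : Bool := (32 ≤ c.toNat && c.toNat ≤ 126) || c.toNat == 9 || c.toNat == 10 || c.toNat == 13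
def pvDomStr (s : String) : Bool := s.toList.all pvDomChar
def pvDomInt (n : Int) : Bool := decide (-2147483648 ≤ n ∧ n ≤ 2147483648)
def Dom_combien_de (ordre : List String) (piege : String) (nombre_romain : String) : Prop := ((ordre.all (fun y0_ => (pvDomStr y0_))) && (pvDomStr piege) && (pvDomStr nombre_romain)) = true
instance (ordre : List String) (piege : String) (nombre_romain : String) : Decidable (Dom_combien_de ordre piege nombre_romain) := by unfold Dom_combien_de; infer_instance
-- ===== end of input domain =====

-- B replaces A's forward scan-and-overwrite accumulator with a backward scan over
-- reversed(enumerate(ordre)) that returns the first qualifying index (early exit); same result.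


-- ===== PORT A =====
-- forward loop: state = (index_dans_l_ordre, quantite), overwrite quantite on a match
def combien_de (ordre : List String) (piege : String) (nombre_romain : String) : Int :=
  (ordre.foldl
    (fun (st : Int × Int) item =>
      let position_item := PySem.Str.find nombre_romain item
      (st.1 + 1,
        if position_item ≠ -1 ∧
            PySem.Str.slice nombre_romain (some (position_item - 1)) (some (position_item + 1)) ≠ piege
        then st.1 else st.2))
    (0, 0)).2

-- ===== PORT B =====
-- 'for index, item in reversed(list(enumerate(ordre))): … return index' / 'return 0'
def combien_de_alt_go (piege : String) (nombre_romain : String) : List (Int × String) → Int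
  | [] => 0
  | (index, item) :: rest =>
      let position_item := PySem.Str.find nombre_romain item
      if position_item ≠ -1 ∧
          PySem.Str.slice nombre_romain (some (position_item - 1)) (some (position_item + 1)) ≠ piege
      then index
      else combien_de_alt_go piege nombre_romain rest

def combien_de_alt (ordre : List String) (piege : String) (nombre_romain : String) : Int :=
  combien_de_alt_go piege nombre_romain (PySem.List.enumerate ordre 0).reverse

-- ===== PRECONDITION & SPEC =====
def Spec_combien_de (ordre : List String) (piege : String) (nombre_romain : String) (out : Int) : Prop := out = combien_de_alt ordre piege nombre_romain
instance (ordre : List String) (piege : String) (nombre_romain : String) (out : Int) : Decidable (Spec_combien_de ordre piege nombre_romain out) := by unfold Spec_combien_de; infer_instance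

-- ===== CLAIM (what is proved, stated in full; the proofs are below) =====
def Claim_equal_combien_de : Prop := ∀ (ordre : List String) (piege : String) (nombre_romain : String), Dom_combien_de ordre piege nombre_romain → Spec_combien_de ordre piege nombre_romain (combien_de ordre piege nombre_romain)

-- ===== LEMMAS AND PROOFS =====

-- B's scan with an explicit default accumulator
def pvGoD (p : String) (nr : String) : List (Int × String) → Int → Int
  | [], q => q
  | (i, item) :: rest, q =>
      if PySem.Str.find nr item ≠ -1 ∧
          PySem.Str.slice nr (some (PySem.Str.find nr item - 1))
            (some (PySem.Str.find nr item + 1)) ≠ p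
      then i else pvGoD p nr rest q

theorem pvGoD_append (p nr : String) (l : List (Int × String)) (i : Int) (x : String) (q : Int) :
    pvGoD p nr (l ++ [(i, x)]) q =
      pvGoD p nr l
        (if PySem.Str.find nr x ≠ -1 ∧
            PySem.Str.slice nr (some (PySem.Str.find nr x - 1))
              (some (PySem.Str.find nr x + 1)) ≠ p
         then i else q) := by
  induction l with
  | nil => simp [pvGoD]
  | cons hd tl ih =>
      obtain ⟨j, y⟩ := hd
      simp only [List.cons_append, pvGoD, ih]

theorem pvFoldl_eq_goD (p nr : String) (l : List String) :
    ∀ (idx q : Int),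
      (l.foldl
        (fun (st : Int × Int) item =>
          let position_item := PySem.Str.find nr item
          (st.1 + 1,
            if position_item ≠ -1 ∧
                PySem.Str.slice nr (some (position_item - 1)) (some (position_item + 1)) ≠ p
            then st.1 else st.2))
        (idx, q)).2
      = pvGoD p nr (PySem.List.enumerate l idx).reverse q := by
  induction l with
  | nil => intro idx q; simp [PySem.List.enumerate_nil, pvGoD]
  | cons x t ih =>
      intro idx q
      simp only [List.foldl_cons, PySem.List.enumerate_cons, List.reverse_cons]
      rw [pvGoD_append, ← ih]

theorem pvGo_eq_goD (p nr : String) (l : List (Int × String)) :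
    combien_de_alt_go p nr l = pvGoD p nr l 0 := by
  induction l with
  | nil => rfl
  | cons hd tl ih =>
      obtain ⟨i, x⟩ := hd
      simp only [combien_de_alt_go, pvGoD, ih]

-- ===== VERDICT (by name: the statement is the Claim_ definition above) =====
theorem combien_de_spec : Claim_equal_combien_de := by
  intro ordre piege nombre_romain _
  show combien_de ordre piege nombre_romain = combien_de_alt ordre piege nombre_romain
  rw [combien_de, combien_de_alt, pvGo_eq_goD, pvFoldl_eq_goD]
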